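-- pv_equiv track=rewrite | github.com/Rockheung/baekjoon-online-judge | python/2448.py | triStarParent
-- ===== SOURCE A (Python) =====
-- def triStar(n):
--     if n % 3 == 0:
--         return '  *  '
--     elif n % 3 == 1:
--         return ' * * '
--     else:
--         return '*****'
--
-- def triStarParent(n,m):
--     if m == 3:
--         return triStar(n)
--     else:
--         m = m//2
--         space = ' ' * m
--         if n < m:
--             stars = triStarParent(n,m)
--             return '{space}{stars}{space}'.format(space=space,
--                                                   stars=stars)
--         else:
--             n = n - m
--             stars = triStarParent(n,m)
--             return '{stars} {stars}'.format(stars=stars)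
-- ===== SOURCE B (Python) =====
-- def triStar(n):
--     if n % 3 == 0:
--         return '  *  '
--     elif n % 3 == 1:
--         return ' * * '
--     else:
--         return '*****'
--
-- def triStarParent(n, m):
--     # Iterative: record halving decisions top-down, then rebuild bottom-up.
--     decisions = []
--     while m != 3:
--         if m <= 2:
--             raise ValueError("m must halve down to exactly 3")
--         m //= 2
--         if n < m:
--             decisions.append(m)      # pad with m spaces on both sides
--         else:
--             n -= m
--             decisions.append(None)   # duplicate with a single space between
--     result = triStar(n)
--     for d in reversed(decisions):
--         if d is None:
--             result = result + ' ' + result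
--         else:
--             sp = ' ' * d
--             result = sp + result + sp
--     return result
-- ===== Notes on version B (the rewrite author's own statement) =====
-- stated objective: alternative
-- what changed: Replaces the recursion with two explicit loops: one that records the pad/duplicate decisions while halving m down to 3 (raising ValueError on m that can never reach 3, where A hits RecursionError), and one that rebuilds the row by applying the recorded decisions in reverse.
import Mathlib
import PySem

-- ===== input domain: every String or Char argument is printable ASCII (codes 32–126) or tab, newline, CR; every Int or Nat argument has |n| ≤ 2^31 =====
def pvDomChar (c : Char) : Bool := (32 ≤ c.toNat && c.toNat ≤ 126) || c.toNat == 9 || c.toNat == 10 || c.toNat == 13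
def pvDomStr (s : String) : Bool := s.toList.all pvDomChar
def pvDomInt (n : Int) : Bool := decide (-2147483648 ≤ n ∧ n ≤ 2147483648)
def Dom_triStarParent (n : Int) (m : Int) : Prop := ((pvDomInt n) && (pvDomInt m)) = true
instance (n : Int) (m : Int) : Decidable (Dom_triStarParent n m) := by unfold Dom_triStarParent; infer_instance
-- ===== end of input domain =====

-- B replaces A's recursion by two explicit loops (record the halving decisions, then rebuild the
-- row in reverse); where A's recursion never bottoms out (RecursionError), B raises ValueError —
-- both are outside Pre_, and equivalence is claimed on the m where the Python A returns.

-- ' ' * w in Python (a non-positive w gives the empty string)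
def pySpaces (w : Int) : String := String.ofList (List.replicate w.toNat ' ')

-- shared helper triStar (identical in Source A and Source B)
def triStar (n : Int) : String :=
  if PySem.Int.mod n 3 = 0 then "  *  "
  else if PySem.Int.mod n 3 = 1 then " * * "
  else "*****"

-- ===== PORT A =====
-- fuel makes the Python recursion total; inside Pre_ the fuel m.toNat + 1 is never exhausted
def triStarParentA : Nat → Int → Int → String
  | 0, _, _ => ""
  | fuel + 1, n, m =>
    if m = 3 then triStar n
    else
      let m' := PySem.Int.floordiv m 2
      let space := pySpaces m'
      if n < m' then
        let stars := triStarParentA fuel n m'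
        space ++ stars ++ space
      else
        let n' := n - m'
        let stars := triStarParentA fuel n' m'
        stars ++ " " ++ stars

def triStarParent (n : Int) (m : Int) : String := triStarParentA (m.toNat + 1) n m

-- ===== PORT B =====
-- first loop of Source B: while m != 3, halve m and record the decision; none = the ValueError raise
-- (fuel as in port A; inside Pre_ it is never exhausted)
def bLoop : Nat → Int → Int → List (Option Int) → Option (Int × List (Option Int))
  | 0, _, _, _ => none
  | fuel + 1, n, m, ds =>
    if m = 3 then some (n, ds)
    else if m ≤ 2 then none
    else
      let m' := PySem.Int.floordiv m 2
      if n < m' then bLoop fuel n m' (ds ++ [some m'])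
      else bLoop fuel (n - m') m' (ds ++ [none])

-- second loop of Source B: apply the recorded decisions (iterated in reverse) to the base row
def bApply (r : String) (ds : List (Option Int)) : String :=
  ds.foldl (fun r d =>
    match d with
    | none => r ++ " " ++ r
    | some w => pySpaces w ++ r ++ pySpaces w) r

def triStarParent_alt (n : Int) (m : Int) : String :=
  match bLoop (m.toNat + 1) n m [] with
  | none => ""   -- Source B raises ValueError here; outside Pre_
  | some (n', ds) => bApply (triStar n') ds.reverse

-- ===== PRECONDITION & SPEC =====
-- Pre_ admits exactly the m whose repeated halving reaches 3, i.e. 3·2^k ≤ m < 4·2^k for some k;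
-- on every other m the Python A never returns (RecursionError), and Source B raises ValueError.
-- The bound k ≤ log₂ m is no restriction: 3·2^k ≤ m already forces 2^k ≤ m; it only makes the
-- existential decidable (a quick check of the ≤ 32 candidate exponents).
def Pre_triStarParent (n : Int) (m : Int) : Prop :=
  ∃ k : Nat, k ≤ Nat.log2 m.toNat ∧ 3 * 2 ^ k ≤ m ∧ m < 4 * 2 ^ k
instance (n : Int) (m : Int) : Decidable (Pre_triStarParent n m) := by unfold Pre_triStarParent; infer_instance
def pvWitness_triStarParent : Int × Int := (5, 13)

def Spec_triStarParent (n : Int) (m : Int) (out : String) : Prop := out = triStarParent_alt n m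
instance (n : Int) (m : Int) (out : String) : Decidable (Spec_triStarParent n m out) := by unfold Spec_triStarParent; infer_instance

-- ===== CLAIM (what is proved, stated in full; the proofs are below) =====
def Claim_equal_triStarParent : Prop := ∀ (n : Int) (m : Int), Dom_triStarParent n m → Pre_triStarParent n m → Spec_triStarParent n m (triStarParent n m)

-- ===== LEMMAS AND PROOFS =====

-- reference recurrence on the number k of halvings still needed
def refRow : Nat → Int → Int → String
  | 0, n, _ => triStar n
  | k + 1, n, m =>
    let m' := PySem.Int.floordiv m 2
    if n < m' then pySpaces m' ++ refRow k n m' ++ pySpaces m'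
    else refRow k (n - m') m' ++ " " ++ refRow k (n - m') m'

lemma half_range (k : Nat) (m : Int) (h : 3 * 2 ^ (k + 1) ≤ m ∧ m < 4 * 2 ^ (k + 1)) :
    3 * 2 ^ k ≤ PySem.Int.floordiv m 2 ∧ PySem.Int.floordiv m 2 < 4 * 2 ^ k := by
  rw [PySem.Int.floordiv_eq_ediv_of_pos (by norm_num)]
  have hp : (2:Int) ^ (k + 1) = 2 ^ k * 2 := by rw [pow_succ]
  rw [hp] at h
  omega

lemma A_eq_ref : ∀ (k fuel : Nat), k < fuel → ∀ (n m : Int),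
    3 * 2 ^ k ≤ m ∧ m < 4 * 2 ^ k → triStarParentA fuel n m = refRow k n m := by
  intro k
  induction k with
  | zero =>
    intro fuel hf n m hm
    have : m = 3 := by simpa using (by omega : m = 3)
    cases fuel with
    | zero => omega
    | succ f => simp [triStarParentA, this, refRow]
  | succ k ih =>
    intro fuel hf n m hm
    cases fuel with
    | zero => omega
    | succ f =>
      have hne : m ≠ 3 := by
        have : (2:Int) ^ (k + 1) = 2 ^ k * 2 := by rw [pow_succ]
        have h1 : (1:Int) ≤ 2 ^ k := one_le_pow₀ (by norm_num)
        omega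
      have hh := half_range k m hm
      simp only [triStarParentA, if_neg hne, refRow]
      split_ifs with h
      · rw [ih f (by omega) n _ hh]
      · rw [ih f (by omega) (n - PySem.Int.floordiv m 2) _ hh]

lemma B_eq_ref : ∀ (k fuel : Nat), k < fuel → ∀ (n m : Int) (ds : List (Option Int)),
    3 * 2 ^ k ≤ m ∧ m < 4 * 2 ^ k →
    (match bLoop fuel n m ds with
     | none => ""
     | some (n', ds') => bApply (triStar n') ds'.reverse)
      = bApply (refRow k n m) ds.reverse := by
  intro k
  induction k with
  | zero =>
    intro fuel hf n m ds hm
    have : m = 3 := by omega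
    cases fuel with
    | zero => omega
    | succ f => simp [bLoop, this, refRow]
  | succ k ih =>
    intro fuel hf n m ds hm
    cases fuel with
    | zero => omega
    | succ f =>
      have h1 : (1:Int) ≤ 2 ^ k := one_le_pow₀ (by norm_num)
      have hp : (2:Int) ^ (k + 1) = 2 ^ k * 2 := by rw [pow_succ]
      have hne : m ≠ 3 := by omega
      have hgt : ¬ m ≤ 2 := by omega
      have hh := half_range k m hm
      simp only [bLoop, if_neg hne, if_neg hgt]
      split_ifs with h
      · rw [ih f (by omega) n _ (ds ++ [some (PySem.Int.floordiv m 2)]) hh]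
        have h' : n < m / 2 := by
          rwa [PySem.Int.floordiv_eq_ediv_of_pos (by norm_num)] at h
        simp [bApply, refRow, h']
      · rw [ih f (by omega) (n - PySem.Int.floordiv m 2) _ (ds ++ [none]) hh]
        have h' : ¬ n < m / 2 := by
          rwa [PySem.Int.floordiv_eq_ediv_of_pos (by norm_num)] at h
        simp [bApply, refRow, h']

lemma k_lt_fuel (k : Nat) (m : Int) (hm : 3 * 2 ^ k ≤ m) : k < m.toNat + 1 := by
  have h1 : k < 2 ^ k := Nat.lt_two_pow_self
  have h2 : ((2 ^ k : Nat) : Int) = 2 ^ k := by push_cast; ring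
  omega

-- ===== VERDICT (by name: the statement is the Claim_ definition above) =====
theorem triStarParent_spec : Claim_equal_triStarParent := by
  intro n m _ hpre
  obtain ⟨k, _, hm⟩ := hpre
  unfold Spec_triStarParent triStarParent triStarParent_alt
  rw [A_eq_ref k _ (k_lt_fuel k m hm.1) n m hm]
  rw [B_eq_ref k _ (k_lt_fuel k m hm.1) n m [] hm]
  simp [bApply]
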